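-- pv_equiv track=rewrite | github.com/StanDobrev11/Python_Algorithms | 05.Graph_Theory_Traversal_and_Topological_Sorting_-_Exercise/03_salaries.py | dfs
-- ===== SOURCE A (Python) =====
-- def dfs(node, graph, salaries):
--     if salaries[node] != None:
--         return salaries[node]
--     if len(graph[node]) == 0:
--         salaries[node] = 1
--         return 1
--
--     salary = 0
--     for child in graph[node]:
--         salary += dfs(child, graph, salaries)
--         salaries[node] = salary
--     return salary
-- ===== SOURCE B (Python) =====
-- def dfs(node, graph, salaries):
--     # Bottom-up fixpoint: repeatedly sweep all keys, resolving any node whose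
--     # children are all resolved, then read off salaries[node]. (Return-value
--     # equivalent to A; the in-place updates to `salaries` differ: this fills
--     # every resolvable key, A only touches nodes it recurses into.)
--     if salaries[node] is not None:
--         return salaries[node]
--     for _ in range(len(graph)):
--         for v in graph:
--             if salaries[v] is None:
--                 kids = graph[v]
--                 if not kids:
--                     salaries[v] = 1
--                 elif all(salaries[c] is not None for c in kids):
--                     salaries[v] = sum(salaries[c] for c in kids)
--     return salaries[node]
-- ===== Notes on version B (the rewrite author's own statement) =====
-- stated objective: alternative
-- what changed: A's memoized recursive top-down DFS is replaced by an iterative bottom-up fixpoint computation: B repeatedly sweeps all graph keys, resolving any node whose children are all resolved, and then reads off salaries[node]; no recursion and no call stack.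
-- outside the precondition, e.g. on dfs(0, {0: [1, 2], 1: [], 2: [0]}, {0: None, 1: None, 2: None}): A returns 2, B returns None; on dfs(0, {0: [1], 1: []}, {0: None, 1: None, 2: 5}): A returns 1, B returns 1
import Mathlib
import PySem

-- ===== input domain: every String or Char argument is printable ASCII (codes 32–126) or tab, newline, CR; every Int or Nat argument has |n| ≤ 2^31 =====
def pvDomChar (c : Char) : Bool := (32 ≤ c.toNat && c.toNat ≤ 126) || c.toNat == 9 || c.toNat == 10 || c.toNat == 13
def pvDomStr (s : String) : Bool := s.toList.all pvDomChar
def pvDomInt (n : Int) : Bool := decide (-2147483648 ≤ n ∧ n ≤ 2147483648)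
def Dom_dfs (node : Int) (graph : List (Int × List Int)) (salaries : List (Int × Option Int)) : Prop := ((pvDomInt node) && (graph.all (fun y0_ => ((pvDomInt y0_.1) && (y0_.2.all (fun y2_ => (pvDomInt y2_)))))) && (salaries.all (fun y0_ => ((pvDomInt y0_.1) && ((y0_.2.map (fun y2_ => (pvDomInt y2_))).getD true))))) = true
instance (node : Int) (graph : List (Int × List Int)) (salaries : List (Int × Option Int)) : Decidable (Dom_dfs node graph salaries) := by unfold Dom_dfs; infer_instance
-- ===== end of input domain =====

-- B replaces A's memoized recursive DFS by an iterative bottom-up fixpoint sweep (alternative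
-- algorithm); equivalence is about the RETURN value only — both mutate `salaries` in place, but
-- B fills every resolvable key while A only writes nodes it recurses into.

-- dict assignment d[k] = v for a present key: overwrite in place
def pySet {α : Type} (l : List (Int × α)) (k : Int) (v : α) : List (Int × α) :=
  l.map (fun p => if p.1 == k then (p.1, v) else p)

-- ===== PORT A =====
-- A's recursion, fueled (Python recurses on an arbitrary dict graph; on the DAGs admitted by
-- Pre_ the fuel graph.length+1 is never exhausted). State threads the mutated salaries dict.
def dfsAgo (graph : List (Int × List Int)) :
    Nat → Int → List (Int × Option Int) → Option (Int × List (Int × Option Int))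
  | 0, _, _ => none
  | (fuel+1), node, sal =>
    match List.lookup node sal with
    | none => none                      -- KeyError
    | some (some v) => some (v, sal)    -- salaries[node] != None
    | some none =>
      match List.lookup node graph with
      | none => none                    -- KeyError
      | some children =>
        if children.length = 0 then
          some (1, pySet sal node (some 1))
        else
          children.foldl (fun acc child =>
            match acc with
            | none => none
            | some (salary, s) =>
              match dfsAgo graph fuel child s with
              | none => none
              | some (v, s') =>
                some (salary + v, pySet s' node (some (salary + v))))
            (some (0, sal))

def dfs (node : Int) (graph : List (Int × List Int)) (salaries : List (Int × Option Int)) : Int :=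
  match dfsAgo graph (graph.length + 1) node salaries with
  | some (v, _) => v
  | none => 0

-- ===== PORT B =====
-- body of B's inner `for v in graph` loop
def dfsBstep (graph : List (Int × List Int)) (s : List (Int × Option Int)) (v : Int) :
    List (Int × Option Int) :=
  match List.lookup v s with
  | some none =>
    match List.lookup v graph with
    | some kids =>
      if kids = [] then pySet s v (some 1)
      else if kids.all (fun c => ((List.lookup c s).getD none).isSome) then
        pySet s v (some ((kids.map (fun c => ((List.lookup c s).getD none).getD 0)).sum))
      else s
    | none => s
  | _ => s

-- one `for v in graph` sweep
def dfsBpass (graph : List (Int × List Int)) (s : List (Int × Option Int)) :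
    List (Int × Option Int) :=
  (graph.map Prod.fst).foldl (dfsBstep graph) s

-- `for _ in range(len(graph))`
def dfsBrounds (graph : List (Int × List Int)) :
    Nat → List (Int × Option Int) → List (Int × Option Int)
  | 0, s => s
  | (r+1), s => dfsBrounds graph r (dfsBpass graph s)

def dfs_alt (node : Int) (graph : List (Int × List Int)) (salaries : List (Int × Option Int)) : Int :=
  match List.lookup node salaries with
  | some (some v) => v
  | some none =>
    match List.lookup node (dfsBrounds graph graph.length salaries) with
    | some (some v) => v
    | _ => 0
  | none => 0

-- ===== PRECONDITION & SPEC =====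
-- "is there a path of ≤ fuel edges from a to b" (used only to state acyclicity of the input)
def pvReachB (graph : List (Int × List Int)) : Nat → Int → Int → Bool
  | 0, _, _ => false
  | (n+1), a, b => ((List.lookup a graph).getD []).any (fun c => c == b || pvReachB graph n c b)

-- Pre_ excludes inputs on which A raises (missing keys, RecursionError on cycles) and inputs where
-- A's value is an artefact of reading a half-written memo entry on a cyclic graph or of never
-- reaching a malformed part of the input (see cites); it keeps every memoized query and every
-- well-formed acyclic dict graph.
def Pre_dfs (node : Int) (graph : List (Int × List Int)) (salaries : List (Int × Option Int)) : Prop :=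
  (salaries.map Prod.fst).Nodup ∧
  (((List.lookup node salaries).getD none).isSome = true ∨
    ((graph.map Prod.fst).Nodup ∧ node ∈ graph.map Prod.fst ∧
     (∀ k ∈ graph.map Prod.fst, k ∈ salaries.map Prod.fst) ∧
     (∀ k ∈ salaries.map Prod.fst, k ∈ graph.map Prod.fst) ∧
     (∀ p ∈ graph, ∀ c ∈ p.2, c ∈ graph.map Prod.fst) ∧
     (∀ v ∈ graph.map Prod.fst, pvReachB graph graph.length v v = false)))

instance (node : Int) (graph : List (Int × List Int)) (salaries : List (Int × Option Int)) :
    Decidable (Pre_dfs node graph salaries) := by unfold Pre_dfs; infer_instance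

def pvWitness_dfs : Int × (List (Int × List Int)) × (List (Int × Option Int)) :=
  (1, [(1, [2, 3]), (2, []), (3, [2])], [(1, none), (2, none), (3, none)])

def Spec_dfs (node : Int) (graph : List (Int × List Int)) (salaries : List (Int × Option Int)) (out : Int) : Prop := out = dfs_alt node graph salaries
instance (node : Int) (graph : List (Int × List Int)) (salaries : List (Int × Option Int)) (out : Int) : Decidable (Spec_dfs node graph salaries out) := by unfold Spec_dfs; infer_instance

-- ===== CLAIM (what is proved, stated in full; the proofs are below) =====
def Claim_equal_dfs : Prop := ∀ (node : Int) (graph : List (Int × List Int)) (salaries : List (Int × Option Int)), Dom_dfs node graph salaries → Pre_dfs node graph salaries → Spec_dfs node graph salaries (dfs node graph salaries)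

-- ===== LEMMAS AND PROOFS =====

-- ---------- lookup / pySet basics ----------

theorem lookup_isSome_iff {α : Type} (l : List (Int × α)) (k : Int) :
    (List.lookup k l).isSome = true ↔ k ∈ l.map Prod.fst := by
  induction l with
  | nil => simp [List.lookup]
  | cons a t ih =>
    simp only [List.lookup, List.map_cons, List.mem_cons]
    by_cases h : k = a.1
    · simp [h]
    · have hb : (k == a.1) = false := by simp [h]
      simp [hb, h, ih]

theorem lookup_mem {α : Type} {l : List (Int × α)} {k : Int} {v : α}
    (h : List.lookup k l = some v) : (k, v) ∈ l := by
  induction l with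
  | nil => simp [List.lookup] at h
  | cons a t ih =>
    simp only [List.lookup] at h
    by_cases hek : k = a.1
    · have hb : (k == a.1) = true := by simp [hek]
      rw [hb] at h
      simp only [Option.some.injEq] at h
      exact List.mem_cons.2 (Or.inl (by rw [Prod.ext_iff]; exact ⟨hek, h.symm⟩))
    · have hb : (k == a.1) = false := by simp [hek]
      rw [hb] at h
      exact List.mem_cons_of_mem _ (ih h)

theorem mapfst_pySet {α : Type} (l : List (Int × α)) (k : Int) (v : α) :
    (pySet l k v).map Prod.fst = l.map Prod.fst := by
  induction l with
  | nil => rfl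
  | cons a t ih =>
    simp only [pySet, List.map_cons] at ih ⊢
    have h1 : (if (a.1 == k) = true then (a.1, v) else a).1 = a.1 := by split <;> rfl
    rw [h1, ih]

theorem lookup_pySet_ne {α : Type} (l : List (Int × α)) (k : Int) (v : α) (j : Int)
    (h : j ≠ k) : List.lookup j (pySet l k v) = List.lookup j l := by
  induction l with
  | nil => rfl
  | cons a t ih =>
    simp only [pySet, List.map_cons, List.lookup] at ih ⊢
    cases hak : (a.1 == k) with
    | true =>
      have h2 : (j == a.1) = false := by
        simp only [beq_iff_eq] at hak ⊢; simp [hak, h]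
      simp only [if_true, h2]
      exact ih
    | false =>
      simp only [Bool.false_eq_true, if_false, List.lookup]
      cases haj : (j == a.1) with
      | true => rfl
      | false => exact ih

theorem lookup_pySet_self {α : Type} (l : List (Int × α)) (k : Int) (v : α)
    (h : k ∈ l.map Prod.fst) : List.lookup k (pySet l k v) = some v := by
  induction l with
  | nil => simp at h
  | cons a t ih =>
    simp only [List.map_cons, List.mem_cons] at h
    simp only [pySet, List.map_cons, List.lookup]
    cases hak : (a.1 == k) with
    | true =>
      have h2 : (k == a.1) = true := by simp only [beq_iff_eq] at hak ⊢; exact hak.symm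
      simp only [if_true, h2]
    | false =>
      have h2 : (k == a.1) = false := by rw [beq_eq_false_iff_ne] at hak ⊢; exact fun he => hak he.symm
      simp only [Bool.false_eq_true, if_false, h2]
      rcases h with h | h
      · exact absurd h.symm (by rw [beq_eq_false_iff_ne] at hak; exact hak)
      · exact ih h

theorem getDnone_isSome_iff (o : Option (Option Int)) :
    ((o.getD none).isSome = true) ↔ ∃ x, o = some (some x) := by
  cases o with
  | none => simp
  | some a => cases a <;> simp

-- ---------- paths, reachability, acyclicity ----------

def EdgeG (graph : List (Int × List Int)) (a b : Int) : Prop :=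
  ∃ cs, List.lookup a graph = some cs ∧ b ∈ cs

def ReachG (graph : List (Int × List Int)) : Int → Int → Prop :=
  Relation.TransGen (EdgeG graph)

def PathTo (graph : List (Int × List Int)) : Int → List Int → Int → Prop
  | a, [], b => EdgeG graph a b
  | a, (x :: p), b => EdgeG graph a x ∧ PathTo graph x p b

theorem pathTo_append (graph : List (Int × List Int)) (u : List Int) :
    ∀ (a x b : Int) (w : List Int),
    PathTo graph a (u ++ x :: w) b ↔ PathTo graph a u x ∧ PathTo graph x w b := by
  induction u with
  | nil => intro a x b w; simp [PathTo]
  | cons y u ih =>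
    intro a x b w
    simp only [List.cons_append, PathTo, ih, and_assoc]

theorem edgeG_src_mem {graph : List (Int × List Int)} {a b : Int}
    (h : EdgeG graph a b) : a ∈ graph.map Prod.fst := by
  obtain ⟨cs, h1, _⟩ := h
  exact (lookup_isSome_iff graph a).1 (by simp [h1])

theorem pathTo_src_mem {graph : List (Int × List Int)} {a : Int} {p : List Int} {b : Int}
    (h : PathTo graph a p b) : a ∈ graph.map Prod.fst := by
  cases p with
  | nil => exact edgeG_src_mem h
  | cons x q => exact edgeG_src_mem h.1

theorem edgeG_tgt_mem {graph : List (Int × List Int)}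
    (CL : ∀ p ∈ graph, ∀ c ∈ p.2, c ∈ graph.map Prod.fst)
    {a b : Int} (h : EdgeG graph a b) : b ∈ graph.map Prod.fst := by
  obtain ⟨cs, h1, h2⟩ := h
  exact CL (a, cs) (lookup_mem h1) b h2

theorem pathTo_mem_keys {graph : List (Int × List Int)}
    (CL : ∀ p ∈ graph, ∀ c ∈ p.2, c ∈ graph.map Prod.fst) :
    ∀ (p : List Int) (a b : Int), PathTo graph a p b →
      (∀ x ∈ p, x ∈ graph.map Prod.fst) ∧ b ∈ graph.map Prod.fst := by
  intro p
  induction p with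
  | nil => intro a b h; exact ⟨by simp, edgeG_tgt_mem CL h⟩
  | cons x q ih =>
    intro a b h
    obtain ⟨h1, h2⟩ := h
    obtain ⟨hq, hb⟩ := ih x b h2
    refine ⟨?_, hb⟩
    intro y hy
    rcases List.mem_cons.1 hy with hy | hy
    · exact hy ▸ edgeG_tgt_mem CL h1
    · exact hq y hy

theorem not_nodup_split {α : Type} [DecidableEq α] :
    ∀ (l : List α), ¬ l.Nodup → ∃ (l1 : List α) (x : α) (l2 l3 : List α), l = l1 ++ x :: (l2 ++ x :: l3) := by
  intro l
  induction l with
  | nil => intro h; exact absurd List.nodup_nil h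
  | cons a t ih =>
    intro h
    by_cases ha : a ∈ t
    · obtain ⟨s, u, hu⟩ := List.append_of_mem ha
      exact ⟨[], a, s, u, by simp [hu]⟩
    · have : ¬ t.Nodup := fun hn => h (List.nodup_cons.2 ⟨ha, hn⟩)
      obtain ⟨l1, x, l2, l3, hl⟩ := ih this
      exact ⟨a :: l1, x, l2, l3, by simp [hl]⟩

theorem pathTo_shorten (graph : List (Int × List Int)) :
    ∀ (n : Nat) (p : List Int) (a b : Int), p.length ≤ n → PathTo graph a p b →
      ∃ q : List Int, PathTo graph a q b ∧ q.Nodup ∧ b ∉ q ∧ q.length ≤ p.length := by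
  intro n
  induction n with
  | zero =>
    intro p a b hl hp
    have : p = [] := List.length_eq_zero_iff.1 (Nat.le_zero.1 hl)
    subst this
    exact ⟨[], hp, List.nodup_nil, by simp, by simp⟩
  | succ n ih =>
    intro p a b hl hp
    by_cases hb : b ∈ p
    · obtain ⟨p1, p2, hsplit⟩ := List.append_of_mem hb
      subst hsplit
      have h1 : PathTo graph a p1 b := ((pathTo_append graph p1 a b b p2).1 hp).1
      have hlen1 : p1.length ≤ n := by
        have := hl; simp [List.length_append] at this ⊢; omega
      obtain ⟨q, hq, hnd, hbq, hql⟩ := ih p1 a b hlen1 h1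
      exact ⟨q, hq, hnd, hbq, by simp [List.length_append]; omega⟩
    · by_cases hnd : p.Nodup
      · exact ⟨p, hp, hnd, hb, le_refl _⟩
      · obtain ⟨l1, x, l2, l3, hsplit⟩ := not_nodup_split p hnd
        subst hsplit
        have h1 := (pathTo_append graph l1 a x b (l2 ++ x :: l3)).1 hp
        have h2 := (pathTo_append graph l2 x x b l3).1 h1.2
        have h3 : PathTo graph a (l1 ++ x :: l3) b :=
          (pathTo_append graph l1 a x b l3).2 ⟨h1.1, h2.2⟩
        have hlen : (l1 ++ x :: l3).length ≤ n := by
          have := hl; simp [List.length_append] at this ⊢; omega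
        obtain ⟨q, hq, hnd', hbq, hql⟩ := ih _ a b hlen h3
        refine ⟨q, hq, hnd', hbq, ?_⟩
        simp [List.length_append] at hql ⊢; omega

theorem reachB_of_pathTo (graph : List (Int × List Int)) :
    ∀ (p : List Int) (a b : Int) (fuel : Nat),
      PathTo graph a p b → p.length + 1 ≤ fuel → pvReachB graph fuel a b = true := by
  intro p
  induction p with
  | nil =>
    intro a b fuel h hl
    obtain ⟨f, rfl⟩ : ∃ f, fuel = f + 1 := ⟨fuel - 1, by omega⟩
    obtain ⟨cs, h1, h2⟩ := h
    simp only [pvReachB, h1, Option.getD_some, List.any_eq_true]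
    exact ⟨b, h2, by simp⟩
  | cons x q ih =>
    intro a b fuel h hl
    obtain ⟨f, rfl⟩ : ∃ f, fuel = f + 1 := ⟨fuel - 1, by omega⟩
    obtain ⟨⟨cs, h1, h2⟩, hrest⟩ := h
    simp only [pvReachB, h1, Option.getD_some, List.any_eq_true]
    refine ⟨x, h2, ?_⟩
    have : pvReachB graph f x b = true := ih x b f hrest (by simp at hl ⊢; omega)
    simp [this]

theorem transGen_pathTo {graph : List (Int × List Int)} {a b : Int}
    (h : ReachG graph a b) : ∃ p, PathTo graph a p b := by
  induction h with
  | single h => exact ⟨[], h⟩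
  | tail _ hedge ih =>
    obtain ⟨p, hp⟩ := ih
    rename_i bmid c _
    exact ⟨p ++ [bmid], (pathTo_append graph p a bmid c []).2 ⟨hp, hedge⟩⟩

theorem reachB_transGen (graph : List (Int × List Int)) :
    ∀ (fuel : Nat) (a b : Int), pvReachB graph fuel a b = true → ReachG graph a b := by
  intro fuel
  induction fuel with
  | zero => intro a b h; simp [pvReachB] at h
  | succ n ih =>
    intro a b h
    simp only [pvReachB, List.any_eq_true] at h
    obtain ⟨c, hc, hor⟩ := h
    cases hg : List.lookup a graph with
    | none => rw [hg] at hc; simp at hc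
    | some cs =>
      rw [hg] at hc; simp at hc
      have hedge : EdgeG graph a c := ⟨cs, hg, hc⟩
      simp only [Bool.or_eq_true, beq_iff_eq] at hor
      rcases hor with hor | hor
      · exact hor ▸ Relation.TransGen.single hedge
      · exact Relation.TransGen.head hedge (ih c b hor)

theorem reach_bounded {graph : List (Int × List Int)}
    (CL : ∀ p ∈ graph, ∀ c ∈ p.2, c ∈ graph.map Prod.fst)
    {a b : Int} (h : ReachG graph a b) :
    pvReachB graph graph.length a b = true := by
  obtain ⟨p, hp⟩ := transGen_pathTo h
  obtain ⟨q, hq, hnd, hbq, _⟩ := pathTo_shorten graph p.length p a b (le_refl _) hp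
  have hmem := pathTo_mem_keys CL q a b hq
  have hsub : (q ++ [b]) ⊆ graph.map Prod.fst := by
    intro y hy
    rcases List.mem_append.1 hy with hy | hy
    · exact hmem.1 y hy
    · simp at hy; exact hy ▸ hmem.2
  have hndq : (q ++ [b]).Nodup := by
    have hq2 : ∀ a ∈ q, ¬ a = b := fun a ha hab => hbq (hab ▸ ha)
    simp only [List.nodup_append, List.nodup_cons, List.not_mem_nil, not_false_iff, List.nodup_nil, List.disjoint_singleton]
    refine ⟨hnd, by simp, ?_⟩
    simpa using hq2
  have hlen : q.length + 1 ≤ graph.length := by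
    have := (hndq.subperm hsub).length_le
    simp [List.length_append] at this
    simpa using this
  exact reachB_of_pathTo graph q a b graph.length hq hlen

theorem reach_noloop {graph : List (Int × List Int)}
    (CL : ∀ p ∈ graph, ∀ c ∈ p.2, c ∈ graph.map Prod.fst)
    (AC : ∀ v ∈ graph.map Prod.fst, pvReachB graph graph.length v v = false) :
    ∀ v, ¬ ReachG graph v v := by
  intro v hr
  have hv : v ∈ graph.map Prod.fst := by
    obtain ⟨p, hp⟩ := transGen_pathTo hr
    exact pathTo_src_mem hp
  have := reach_bounded CL hr
  rw [AC v hv] at this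
  exact Bool.false_ne_true this

-- ---------- the measure ----------

def mG (graph : List (Int × List Int)) (v : Int) : Nat :=
  (graph.map Prod.fst).countP (fun k => pvReachB graph graph.length v k)

theorem countP_le_of_imp {α : Type} (l : List α) (p q : α → Bool)
    (h : ∀ a ∈ l, p a = true → q a = true) : l.countP p ≤ l.countP q := by
  induction l with
  | nil => simp
  | cons a t ih =>
    simp only [List.countP_cons]
    have h1 := ih (fun x hx => h x (List.mem_cons_of_mem a hx))
    by_cases hp : p a = true
    · simp [hp, h a (List.mem_cons_self) hp]; omega
    · simp only [Bool.not_eq_true] at hp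
      simp [hp]
      split <;> omega

theorem countP_lt_of_witness {α : Type} (l : List α) (p q : α → Bool)
    (h : ∀ a ∈ l, p a = true → q a = true)
    (c : α) (hc : c ∈ l) (hqc : q c = true) (hpc : p c = false) :
    l.countP p < l.countP q := by
  induction l with
  | nil => simp at hc
  | cons a t ih =>
    simp only [List.countP_cons]
    rcases List.mem_cons.1 hc with hac | hct
    · subst hac
      have h1 := countP_le_of_imp t p q (fun x hx => h x (List.mem_cons_of_mem _ hx))
      simp [hpc, hqc]; omega
    · have h1 := ih (fun x hx => h x (List.mem_cons_of_mem a hx)) hct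
      by_cases hp : p a = true
      · simp [hp, h a (List.mem_cons_self) hp]; omega
      · simp only [Bool.not_eq_true] at hp
        simp [hp]; split <;> omega

theorem mG_lt {graph : List (Int × List Int)}
    (CL : ∀ p ∈ graph, ∀ c ∈ p.2, c ∈ graph.map Prod.fst)
    (AC : ∀ v ∈ graph.map Prod.fst, pvReachB graph graph.length v v = false)
    {v c : Int} (hedge : EdgeG graph v c) : mG graph c < mG graph v := by
  apply countP_lt_of_witness _ _ _ ?_ c (edgeG_tgt_mem CL hedge) ?_ ?_
  · intro k _ hk
    exact reach_bounded CL (Relation.TransGen.head hedge (reachB_transGen graph _ c k hk))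
  · exact reach_bounded CL (Relation.TransGen.single hedge)
  · exact AC c (edgeG_tgt_mem CL hedge)

theorem mG_bound {graph : List (Int × List Int)}
    (AC : ∀ v ∈ graph.map Prod.fst, pvReachB graph graph.length v v = false)
    {v : Int} (hv : v ∈ graph.map Prod.fst) : mG graph v < graph.length := by
  have h1 : (graph.map Prod.fst).countP (fun k => pvReachB graph graph.length v k)
      < (graph.map Prod.fst).countP (fun _ => true) := by
    apply countP_lt_of_witness _ _ _ (by intro a _ _; rfl) v hv rfl (AC v hv)
  have h2 : (graph.map Prod.fst).countP (fun _ => true) = graph.length := by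
    simp [List.countP_true]
  rw [← h2]; exact h1

-- ---------- B-side: monotonicity, consistency, progress ----------

def MonoS (s s' : List (Int × Option Int)) : Prop :=
  ∀ k x, List.lookup k s = some (some x) → List.lookup k s' = some (some x)

theorem monoS_pySet_none {s : List (Int × Option Int)} {v : Int}
    (h : List.lookup v s = some none) (w : Option Int) : MonoS s (pySet s v w) := by
  intro k x hk
  by_cases hkv : k = v
  · rw [hkv, h] at hk; simp at hk
  · rw [lookup_pySet_ne s v w k hkv]; exact hk

theorem monoS_step (graph : List (Int × List Int)) (s : List (Int × Option Int)) (v : Int) :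
    MonoS s (dfsBstep graph s v) := by
  unfold dfsBstep
  cases hv : List.lookup v s with
  | none => exact fun k x hk => hk
  | some a =>
    cases a with
    | some y => exact fun k x hk => hk
    | none =>
      cases List.lookup v graph with
      | none => exact fun k x hk => hk
      | some kids =>
        dsimp only
        split_ifs with h1 h2
        · exact monoS_pySet_none hv _
        · exact monoS_pySet_none hv _
        · exact fun k x hk => hk

theorem mapfst_step (graph : List (Int × List Int)) (s : List (Int × Option Int)) (v : Int) :
    (dfsBstep graph s v).map Prod.fst = s.map Prod.fst := by
  unfold dfsBstep
  cases List.lookup v s with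
  | none => rfl
  | some a =>
    cases a with
    | some y => rfl
    | none =>
      cases List.lookup v graph with
      | none => rfl
      | some kids => dsimp only; split_ifs <;> simp [mapfst_pySet]

theorem monoS_foldl (graph : List (Int × List Int)) :
    ∀ (ks : List Int) (s : List (Int × Option Int)),
      MonoS s (ks.foldl (dfsBstep graph) s) := by
  intro ks
  induction ks with
  | nil => exact fun s k x h => h
  | cons a t ih =>
    intro s k x h
    exact ih (dfsBstep graph s a) k x (monoS_step graph s a k x h)

theorem mapfst_foldl (graph : List (Int × List Int)) :
    ∀ (ks : List Int) (s : List (Int × Option Int)),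
      ((ks.foldl (dfsBstep graph) s)).map Prod.fst = s.map Prod.fst := by
  intro ks
  induction ks with
  | nil => intro s; rfl
  | cons a t ih => intro s; rw [List.foldl_cons, ih, mapfst_step]

theorem monoS_rounds (graph : List (Int × List Int)) :
    ∀ (r : Nat) (s : List (Int × Option Int)), MonoS s (dfsBrounds graph r s) := by
  intro r
  induction r with
  | zero => exact fun s k x h => h
  | succ n ih =>
    intro s k x h
    exact ih (dfsBpass graph s) k x (monoS_foldl graph _ s k x h)

theorem mapfst_rounds (graph : List (Int × List Int)) :
    ∀ (r : Nat) (s : List (Int × Option Int)),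
      (dfsBrounds graph r s).map Prod.fst = s.map Prod.fst := by
  intro r
  induction r with
  | zero => intro s; rfl
  | succ n ih => intro s; rw [dfsBrounds, ih, dfsBpass, mapfst_foldl]

def EqnAt (graph : List (Int × List Int)) (final : List (Int × Option Int))
    (k : Int) (y : Int) : Prop :=
  ∃ cs, List.lookup k graph = some cs ∧
    ((cs = [] ∧ y = 1) ∨
     (cs ≠ [] ∧ ∃ xs, List.Forall₂ (fun c x => List.lookup c final = some (some x)) cs xs ∧
        y = xs.sum))

theorem eqnAt_mono {graph : List (Int × List Int)} {s s' : List (Int × Option Int)}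
    (h : MonoS s s') {k : Int} {y : Int} (he : EqnAt graph s k y) : EqnAt graph s' k y := by
  obtain ⟨cs, h1, h2⟩ := he
  refine ⟨cs, h1, ?_⟩
  rcases h2 with h2 | ⟨hne, xs, hfa, hy⟩
  · exact Or.inl h2
  · exact Or.inr ⟨hne, xs, hfa.imp (fun _ _ hr => h _ _ hr), hy⟩

def GoodS (graph : List (Int × List Int)) (sal0 s : List (Int × Option Int)) : Prop :=
  ∀ k, (List.lookup k s = List.lookup k sal0) ∨
    (∃ y, List.lookup k sal0 = some none ∧ List.lookup k s = some (some y) ∧ EqnAt graph s k y)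

theorem goodS_step (graph : List (Int × List Int)) (sal0 s : List (Int × Option Int)) (v : Int)
    (hg : GoodS graph sal0 s) : GoodS graph sal0 (dfsBstep graph s v) := by
  cases hv : List.lookup v s with
  | none =>
    have he : dfsBstep graph s v = s := by unfold dfsBstep; rw [hv]
    rw [he]; exact hg
  | some a =>
    cases a with
    | some y =>
      have he : dfsBstep graph s v = s := by unfold dfsBstep; rw [hv]
      rw [he]; exact hg
    | none =>
      have hsal0v : List.lookup v sal0 = some none := by
        rcases hg v with h | ⟨y, _, hvs, _⟩
        · rw [← h, hv]
        · rw [hvs] at hv; simp at hv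
      have hvs : v ∈ s.map Prod.fst := (lookup_isSome_iff s v).1 (by simp [hv])
      cases hgr : List.lookup v graph with
      | none =>
        have he : dfsBstep graph s v = s := by unfold dfsBstep; rw [hv, hgr]
        rw [he]; exact hg
      | some kids =>
        by_cases h1 : kids = []
        · -- leaf write
          have he : dfsBstep graph s v = pySet s v (some 1) := by
            unfold dfsBstep; rw [hv, hgr]; dsimp only; rw [if_pos h1]
          have hmono : MonoS s (pySet s v (some 1)) := monoS_pySet_none hv _
          rw [he]
          intro k
          by_cases hkv : k = v
          · subst hkv
            refine Or.inr ⟨1, hsal0v, lookup_pySet_self s k (some 1) hvs,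
              ⟨kids, hgr, Or.inl ⟨h1, rfl⟩⟩⟩
          · rw [lookup_pySet_ne s v (some 1) k hkv]
            rcases hg k with h | ⟨y, ha, hb, hc⟩
            · exact Or.inl h
            · exact Or.inr ⟨y, ha, hb, eqnAt_mono hmono hc⟩
        · by_cases h2 : kids.all (fun c => ((List.lookup c s).getD none).isSome) = true
          · -- interior write
            have he : dfsBstep graph s v = pySet s v
                (some ((kids.map (fun c => ((List.lookup c s).getD none).getD 0)).sum)) := by
              unfold dfsBstep; rw [hv, hgr]; dsimp only; rw [if_neg h1, if_pos h2]
            have hmono : MonoS s (pySet s v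
                (some ((kids.map (fun c => ((List.lookup c s).getD none).getD 0)).sum))) :=
              monoS_pySet_none hv _
            rw [he]
            intro k
            by_cases hkv : k = v
            · subst hkv
              refine Or.inr ⟨_, hsal0v, lookup_pySet_self s k _ hvs, ?_⟩
              refine ⟨kids, hgr, Or.inr ⟨h1,
                kids.map (fun c => ((List.lookup c s).getD none).getD 0), ?_, rfl⟩⟩
              have hall : ∀ c ∈ kids, ((List.lookup c s).getD none).isSome = true :=
                List.all_eq_true.1 h2
              have hfa : List.Forall₂ (fun c x => List.lookup c s = some (some x)) kids
                  (kids.map (fun c => ((List.lookup c s).getD none).getD 0)) := by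
                rw [List.forall₂_map_right_iff]
                apply List.forall₂_same.2
                intro c hc
                obtain ⟨x, hx⟩ := (getDnone_isSome_iff _).1 (hall c hc)
                simp [hx]
              exact hfa.imp (fun _ _ hr => hmono _ _ hr)
            · rw [lookup_pySet_ne s v _ k hkv]
              rcases hg k with h | ⟨y, ha, hb, hc⟩
              · exact Or.inl h
              · exact Or.inr ⟨y, ha, hb, eqnAt_mono hmono hc⟩
          · have he : dfsBstep graph s v = s := by
              unfold dfsBstep; rw [hv, hgr]; dsimp only; rw [if_neg h1, if_neg h2]
            rw [he]; exact hg

theorem goodS_foldl (graph : List (Int × List Int)) (sal0 : List (Int × Option Int)) :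
    ∀ (ks : List Int) (s : List (Int × Option Int)),
      GoodS graph sal0 s → GoodS graph sal0 (ks.foldl (dfsBstep graph) s) := by
  intro ks
  induction ks with
  | nil => exact fun s h => h
  | cons a t ih => exact fun s h => ih _ (goodS_step graph sal0 s a h)

theorem goodS_rounds (graph : List (Int × List Int)) (sal0 : List (Int × Option Int)) :
    ∀ (r : Nat) (s : List (Int × Option Int)),
      GoodS graph sal0 s → GoodS graph sal0 (dfsBrounds graph r s) := by
  intro r
  induction r with
  | zero => exact fun s h => h
  | succ n ih => exact fun s h => ih _ (goodS_foldl graph sal0 _ s h)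

def isSetS (s : List (Int × Option Int)) (k : Int) : Prop :=
  ∃ x, List.lookup k s = some (some x)

theorem isSet_mono {s s' : List (Int × Option Int)} (h : MonoS s s') {k : Int}
    (hs : isSetS s k) : isSetS s' k := by
  obtain ⟨x, hx⟩ := hs
  exact ⟨x, h k x hx⟩

theorem pass_sets (graph : List (Int × List Int)) :
    ∀ (ks : List Int) (s : List (Int × Option Int)) (v : Int), v ∈ ks →
      v ∈ graph.map Prod.fst → v ∈ s.map Prod.fst →
      (∀ cs, List.lookup v graph = some cs → ∀ c ∈ cs, isSetS s c) →
      isSetS (ks.foldl (dfsBstep graph) s) v := by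
  intro ks
  induction ks with
  | nil => intro s v hv; simp at hv
  | cons a t ih =>
    intro s v hv hvk hsk hkids
    rw [List.foldl_cons]
    by_cases hva : v = a
    · subst hva
      have hstep : isSetS (dfsBstep graph s v) v := by
        unfold dfsBstep
        cases hv1 : List.lookup v s with
        | none =>
          exact absurd ((lookup_isSome_iff s v).2 hsk) (by simp [hv1])
        | some b =>
          cases b with
          | some y => exact ⟨y, hv1⟩
          | none =>
            cases hgr : List.lookup v graph with
            | none =>
              exact absurd ((lookup_isSome_iff graph v).2 hvk) (by simp [hgr])
            | some kids =>
              have hks := hkids kids hgr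
              dsimp only
              by_cases hk0 : kids = []
              · rw [if_pos hk0]
                exact ⟨1, lookup_pySet_self s v (some 1) hsk⟩
              · have hall : kids.all (fun c => ((List.lookup c s).getD none).isSome) = true := by
                  apply List.all_eq_true.2
                  intro c hc
                  obtain ⟨x, hx⟩ := hks c hc
                  simp [hx]
                rw [if_neg hk0, if_pos hall]
                exact ⟨_, lookup_pySet_self s v _ hsk⟩
      exact isSet_mono (monoS_foldl graph t _) hstep
    · have hv' : v ∈ t := by
        rcases List.mem_cons.1 hv with h | h
        · exact absurd h hva
        · exact h
      apply ih _ v hv' hvk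
      · rw [mapfst_step]; exact hsk
      · intro cs hcs c hc
        exact isSet_mono (monoS_step graph s a) (hkids cs hcs c hc)

theorem rounds_comm (graph : List (Int × List Int)) :
    ∀ (r : Nat) (s : List (Int × Option Int)),
      dfsBrounds graph (r+1) s = dfsBpass graph (dfsBrounds graph r s) := by
  intro r
  induction r with
  | zero => intro s; rfl
  | succ n ih =>
    intro s
    show dfsBrounds graph (n+1) (dfsBpass graph s) = _
    rw [ih (dfsBpass graph s)]
    rfl

theorem rounds_progress (graph : List (Int × List Int)) (sal0 : List (Int × Option Int))
    (CL : ∀ p ∈ graph, ∀ c ∈ p.2, c ∈ graph.map Prod.fst)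
    (AC : ∀ v ∈ graph.map Prod.fst, pvReachB graph graph.length v v = false)
    (SK1 : ∀ k ∈ graph.map Prod.fst, k ∈ sal0.map Prod.fst) :
    ∀ (r : Nat) (v : Int), v ∈ graph.map Prod.fst → mG graph v < r →
      isSetS (dfsBrounds graph r sal0) v := by
  intro r
  induction r with
  | zero => intro v _ h; omega
  | succ n ih =>
    intro v hv hm
    rw [rounds_comm]
    unfold dfsBpass
    apply pass_sets graph _ _ v hv hv
    · rw [mapfst_rounds]; exact SK1 v hv
    · intro cs hcs c hc
      have hedge : EdgeG graph v c := ⟨cs, hcs, hc⟩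
      have hck : c ∈ graph.map Prod.fst := edgeG_tgt_mem CL hedge
      have : mG graph c < n := by
        have := mG_lt CL AC hedge; omega
      exact ih c hck this

def FinalS (graph : List (Int × List Int)) (sal0 : List (Int × Option Int)) :
    List (Int × Option Int) :=
  dfsBrounds graph graph.length sal0

theorem final_set (graph : List (Int × List Int)) (sal0 : List (Int × Option Int))
    (CL : ∀ p ∈ graph, ∀ c ∈ p.2, c ∈ graph.map Prod.fst)
    (AC : ∀ v ∈ graph.map Prod.fst, pvReachB graph graph.length v v = false)
    (SK1 : ∀ k ∈ graph.map Prod.fst, k ∈ sal0.map Prod.fst)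
    {v : Int} (hv : v ∈ graph.map Prod.fst) : isSetS (FinalS graph sal0) v :=
  rounds_progress graph sal0 CL AC SK1 graph.length v hv (mG_bound AC hv)

def svF (s : List (Int × Option Int)) (k : Int) : Int :=
  ((List.lookup k s).getD none).getD 0

theorem forall2_svF (final : List (Int × Option Int)) :
    ∀ (cs : List Int) (xs : List Int),
      List.Forall₂ (fun c x => List.lookup c final = some (some x)) cs xs →
      xs = cs.map (svF final) := by
  intro cs xs h
  induction h with
  | nil => rfl
  | cons hr _ ih => simp [ih, svF, hr.symm]; simp [hr]

-- ---------- A-side: main invariant lemma ----------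

theorem A_main (graph : List (Int × List Int)) (sal0 : List (Int × Option Int))
    (CL : ∀ p ∈ graph, ∀ c ∈ p.2, c ∈ graph.map Prod.fst)
    (AC : ∀ v ∈ graph.map Prod.fst, pvReachB graph graph.length v v = false)
    (SK1 : ∀ k ∈ graph.map Prod.fst, k ∈ sal0.map Prod.fst) :
    ∀ (fuel : Nat) (v : Int) (sal : List (Int × Option Int)),
      v ∈ graph.map Prod.fst →
      sal.map Prod.fst = sal0.map Prod.fst →
      (∀ k, ¬ ReachG graph k v →
        List.lookup k sal = List.lookup k sal0 ∨
        List.lookup k sal = List.lookup k (FinalS graph sal0)) →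
      mG graph v < fuel →
      ∃ x sal',
        dfsAgo graph fuel v sal = some (x, sal') ∧
        List.lookup v (FinalS graph sal0) = some (some x) ∧
        sal'.map Prod.fst = sal0.map Prod.fst ∧
        (∀ k, List.lookup k sal' ≠ List.lookup k sal → (k = v ∨ ReachG graph v k)) ∧
        (∀ k, List.lookup k sal' = List.lookup k sal ∨
          List.lookup k sal' = List.lookup k (FinalS graph sal0)) := by
  intro fuel
  induction fuel with
  | zero => intro v sal _ _ _ hm; omega
  | succ fuel ih =>
    intro v sal hv hmap hinv hm
    have hnoloop := reach_noloop CL AC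
    obtain ⟨fx, hfx⟩ : isSetS (FinalS graph sal0) v := final_set graph sal0 CL AC SK1 hv
    have hvsal : (List.lookup v sal).isSome = true := by
      rw [lookup_isSome_iff, hmap]; exact SK1 v hv
    have hinvv := hinv v (hnoloop v)
    cases h1 : List.lookup v sal with
    | none => rw [h1] at hvsal; simp at hvsal
    | some a =>
      cases a with
      | some x =>
        refine ⟨x, sal, ?_, ?_, hmap, fun k hk => absurd rfl hk, fun k => Or.inl rfl⟩
        · rw [dfsAgo, h1]
        · rw [h1] at hinvv
          rcases hinvv with h | h
          · exact monoS_rounds graph graph.length sal0 v x h.symm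
          · exact h.symm
      | none =>
        have hsal0v : List.lookup v sal0 = some none := by
          rw [h1] at hinvv
          rcases hinvv with h | h
          · exact h.symm
          · rw [hfx] at h; simp at h
        have hgr_some : (List.lookup v graph).isSome = true := (lookup_isSome_iff graph v).2 hv
        cases h2 : List.lookup v graph with
        | none => rw [h2] at hgr_some; simp at hgr_some
        | some cs =>
          have hgood : GoodS graph sal0 (FinalS graph sal0) :=
            goodS_rounds graph sal0 graph.length sal0 (fun k => Or.inl rfl)
          rcases hgood v with hgv | ⟨y, _, hfy, hEq⟩
          · rw [hgv, hsal0v] at hfx; simp at hfx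
          obtain ⟨cs', hcs', hbr⟩ := hEq
          have hcseq : cs' = cs := by rw [h2] at hcs'; exact (Option.some.inj hcs').symm
          rw [hcseq] at hbr
          by_cases hcs0 : cs.length = 0
          · -- leaf
            have hnil : cs = [] := List.length_eq_zero_iff.1 hcs0
            have hy1 : y = 1 := by
              rcases hbr with ⟨_, hy1⟩ | ⟨hne, _⟩
              · exact hy1
              · exact absurd hnil hne
            have hvs : v ∈ sal.map Prod.fst := (lookup_isSome_iff sal v).1 (by simp [h1])
            refine ⟨1, pySet sal v (some 1), ?_, by rw [hfy, hy1], ?_, ?_, ?_⟩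
            · rw [dfsAgo, h1, h2]; dsimp only; rw [if_pos hcs0]
            · rw [mapfst_pySet, hmap]
            · intro k hk
              by_cases hkv : k = v
              · exact Or.inl hkv
              · rw [lookup_pySet_ne sal v _ k hkv] at hk; exact absurd rfl hk
            · intro k
              by_cases hkv : k = v
              · subst hkv
                rw [lookup_pySet_self sal k _ hvs, hfy, hy1]
                exact Or.inr rfl
              · rw [lookup_pySet_ne sal v _ k hkv]; exact Or.inl rfl
          · -- interior node: the children loop
            have hne : cs ≠ [] := fun h => hcs0 (h ▸ rfl)
            rcases hbr with ⟨hnil, _⟩ | ⟨_, xs, hfa, hy⟩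
            · exact absurd hnil hne
            have hxs : xs = cs.map (svF (FinalS graph sal0)) := forall2_svF _ cs xs hfa
            have loop : ∀ suf : List Int, (∀ c ∈ suf, c ∈ cs) →
                ∀ (salary : Int) (s : List (Int × Option Int)),
                s.map Prod.fst = sal0.map Prod.fst →
                (∀ k, k ≠ v → ¬ ReachG graph k v →
                  List.lookup k s = List.lookup k sal0 ∨
                  List.lookup k s = List.lookup k (FinalS graph sal0)) →
                (∀ k, List.lookup k s ≠ List.lookup k sal → (k = v ∨ ReachG graph v k)) →
                (∀ k, k ≠ v →
                  (List.lookup k s = List.lookup k sal ∨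
                   List.lookup k s = List.lookup k (FinalS graph sal0))) →
                ∃ s_out,
                  List.foldl (fun acc child =>
                    match acc with
                    | none => none
                    | some (salary, s) =>
                      match dfsAgo graph fuel child s with
                      | none => none
                      | some (v', s') =>
                        some (salary + v', pySet s' v (some (salary + v'))))
                    (some (salary, s)) suf
                    = some (salary + ((suf.map (svF (FinalS graph sal0))).sum), s_out) ∧
                  s_out.map Prod.fst = sal0.map Prod.fst ∧
                  (∀ k, List.lookup k s_out ≠ List.lookup k sal → (k = v ∨ ReachG graph v k)) ∧
                  (∀ k, k ≠ v →
                    (List.lookup k s_out = List.lookup k sal ∨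
                     List.lookup k s_out = List.lookup k (FinalS graph sal0))) ∧
                  (suf ≠ [] → List.lookup v s_out =
                    some (some (salary + (suf.map (svF (FinalS graph sal0))).sum))) ∧
                  (suf = [] → s_out = s) := by
              intro suf
              induction suf with
              | nil =>
                intro _ salary s h_i h_ii h_iii h_iv
                exact ⟨s, by simp, h_i, h_iii, h_iv, fun h => absurd rfl h, fun _ => rfl⟩
              | cons c rest ihs =>
                intro hsub salary s h_i h_ii h_iii h_iv
                have hc_cs : c ∈ cs := hsub c List.mem_cons_self
                have hedge : EdgeG graph v c := ⟨cs, h2, hc_cs⟩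
                have hck : c ∈ graph.map Prod.fst := edgeG_tgt_mem CL hedge
                have hmc : mG graph c < fuel := by
                  have := mG_lt CL AC hedge; omega
                have hinvc : ∀ k, ¬ ReachG graph k c →
                    List.lookup k s = List.lookup k sal0 ∨
                    List.lookup k s = List.lookup k (FinalS graph sal0) := by
                  intro k hk
                  by_cases hkv : k = v
                  · exact absurd (hkv ▸ Relation.TransGen.single hedge) hk
                  · exact h_ii k hkv (fun hr => hk (Relation.TransGen.tail hr hedge))
                obtain ⟨x, s₁, hrun, hfinc, hs1map, hs1chg, hs1disj⟩ :=
                  ih c s hck h_i hinvc hmc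
                have hx : x = svF (FinalS graph sal0) c := by simp [svF, hfinc]
                have hvs1 : v ∈ s₁.map Prod.fst := by rw [hs1map]; exact SK1 v hv
                have hstep : (List.foldl (fun acc child =>
                    match acc with
                    | none => none
                    | some (salary, s) =>
                      match dfsAgo graph fuel child s with
                      | none => none
                      | some (v', s') =>
                        some (salary + v', pySet s' v (some (salary + v'))))
                    (some (salary, s)) (c :: rest))
                    = List.foldl (fun acc child =>
                    match acc with
                    | none => none
                    | some (salary, s) =>
                      match dfsAgo graph fuel child s with
                      | none => none
                      | some (v', s') =>
                        some (salary + v', pySet s' v (some (salary + v'))))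
                    (some (salary + x, pySet s₁ v (some (salary + x)))) rest := by
                  rw [List.foldl_cons]; dsimp only; rw [hrun]
                rw [hstep]
                have h_i₂ : (pySet s₁ v (some (salary + x))).map Prod.fst = sal0.map Prod.fst := by
                  rw [mapfst_pySet, hs1map]
                have h_ii₂ : ∀ k, k ≠ v → ¬ ReachG graph k v →
                    List.lookup k (pySet s₁ v (some (salary + x))) = List.lookup k sal0 ∨
                    List.lookup k (pySet s₁ v (some (salary + x))) =
                      List.lookup k (FinalS graph sal0) := by
                  intro k hkv hkr
                  rw [lookup_pySet_ne s₁ v _ k hkv]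
                  rcases hs1disj k with h | h
                  · rw [h]; exact h_ii k hkv hkr
                  · exact Or.inr h
                have h_iii₂ : ∀ k, List.lookup k (pySet s₁ v (some (salary + x))) ≠
                    List.lookup k sal → (k = v ∨ ReachG graph v k) := by
                  intro k hk
                  by_cases hkv : k = v
                  · exact Or.inl hkv
                  · rw [lookup_pySet_ne s₁ v _ k hkv] at hk
                    by_cases hks : List.lookup k s₁ = List.lookup k s
                    · rw [hks] at hk; exact h_iii k hk
                    · rcases hs1chg k hks with hkc | hkc
                      · exact Or.inr (hkc ▸ Relation.TransGen.single hedge)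
                      · exact Or.inr (Relation.TransGen.head hedge hkc)
                have h_iv₂ : ∀ k, k ≠ v →
                    (List.lookup k (pySet s₁ v (some (salary + x))) = List.lookup k sal ∨
                     List.lookup k (pySet s₁ v (some (salary + x))) =
                       List.lookup k (FinalS graph sal0)) := by
                  intro k hkv
                  rw [lookup_pySet_ne s₁ v _ k hkv]
                  rcases hs1disj k with h | h
                  · rw [h]; exact h_iv k hkv
                  · exact Or.inr h
                obtain ⟨s_out, hfold, ho1, ho2, ho3, ho4, ho5⟩ :=
                  ihs (fun d hd => hsub d (List.mem_cons_of_mem c hd))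
                    (salary + x) (pySet s₁ v (some (salary + x))) h_i₂ h_ii₂ h_iii₂ h_iv₂
                refine ⟨s_out, ?_, ho1, ho2, ho3, ?_, fun h => by simp at h⟩
                · rw [hfold]
                  congr 2
                  rw [hx, List.map_cons, List.sum_cons]
                  ring
                · intro _
                  by_cases hrest : rest = []
                  · rw [ho5 hrest, lookup_pySet_self s₁ v _ hvs1, hx, hrest]
                    simp
                  · rw [ho4 hrest, hx]
                    simp only [List.map_cons, List.sum_cons, Option.some.injEq]
                    omega
            obtain ⟨s_out, hfold, ho1, ho2, ho3, ho4, _⟩ :=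
              loop cs (fun c h => h) 0 sal hmap
                (fun k _ hnr => hinv k hnr) (fun k h => absurd rfl h) (fun k _ => Or.inl rfl)
            have hyeq : y = ((cs.map (svF (FinalS graph sal0))).sum) := by rw [hy, hxs]
            have hsum0 : (0 : Int) + ((cs.map (svF (FinalS graph sal0))).sum) = y := by
              rw [hyeq]; ring
            refine ⟨y, s_out, ?_, hfy, ho1, ho2, ?_⟩
            · rw [dfsAgo, h1, h2]; dsimp only; rw [if_neg hcs0, hfold, hsum0]
            · intro k
              by_cases hkv : k = v
              · subst hkv
                rw [ho4 hne, hsum0, hfy]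
                exact Or.inr rfl
              · exact ho3 k hkv

-- ---------- assembling the verdict ----------

theorem dfs_eq_alt (node : Int) (graph : List (Int × List Int))
    (salaries : List (Int × Option Int)) (hpre : Pre_dfs node graph salaries) :
    dfs node graph salaries = dfs_alt node graph salaries := by
  obtain ⟨hnd, hbr⟩ := hpre
  cases h0 : List.lookup node salaries with
  | none =>
    exfalso
    rcases hbr with h | ⟨_, hkv, SK1, _, _, _⟩
    · rw [h0] at h; simp at h
    · have := (lookup_isSome_iff salaries node).2 (SK1 node hkv)
      rw [h0] at this; simp at this
  | some a =>
    cases a with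
    | some x =>
      have hA : dfsAgo graph (graph.length + 1) node salaries = some (x, salaries) := by
        rw [dfsAgo, h0]
      unfold dfs dfs_alt
      rw [hA, h0]
    | none =>
      rcases hbr with h | ⟨_, hkv, SK1, _, CL, AC⟩
      · rw [h0] at h; simp at h
      · have hm : mG graph node < graph.length + 1 := by
          have := mG_bound AC hkv; omega
        obtain ⟨x, sal', hrun, hfinal, _, _, _⟩ :=
          A_main graph salaries CL AC SK1 (graph.length + 1) node salaries hkv rfl
            (fun k _ => Or.inl rfl) hm
        have hfinal' : List.lookup node (dfsBrounds graph graph.length salaries)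
            = some (some x) := hfinal
        unfold dfs dfs_alt
        rw [hrun, h0, hfinal']

-- ===== VERDICT (by name: the statement is the Claim_ definition above) =====
theorem dfs_spec : Claim_equal_dfs := by
  intro node graph salaries _ hpre
  unfold Spec_dfs
  exact dfs_eq_alt node graph salaries hpre
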